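-- pv_equiv track=rewrite | github.com/qhungbui7/sandbox | amg.py | sanitize_postfix
-- ===== SOURCE A (Python) =====
-- def sanitize_postfix(value: str | None) -> str:
--     text = (value or "").strip().lower()
--     if not text:
--         return ""
--     out = []
--     prev_sep = False
--     for ch in text:
--         if ch.isalnum():
--             out.append(ch)
--             prev_sep = False
--             continue
--         if not prev_sep:
--             out.append("-")
--             prev_sep = True
--     return "".join(out).strip("-")
-- ===== SOURCE B (Python) =====
-- def sanitize_postfix(value):
--     text = (value or "").strip().lower()
--     res = []
--     i, n = 0, len(text)
--     while i < n:
--         j = i + 1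
--         if text[i].isalnum():
--             while j < n and text[j].isalnum():
--                 j += 1
--             res.append(text[i:j])
--         else:
--             while j < n and not text[j].isalnum():
--                 j += 1
--             res.append("-")
--         i = j
--     return "".join(res).strip("-")
-- ===== Notes on version B (the rewrite author's own statement) =====
-- stated objective: alternative
-- what changed: Replaces A's per-character prev_sep flag state machine with a run-grouping traversal: each maximal alnum run is appended as one slice and each maximal non-alnum run as one '-', then joined and stripped.
import Mathlib
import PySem

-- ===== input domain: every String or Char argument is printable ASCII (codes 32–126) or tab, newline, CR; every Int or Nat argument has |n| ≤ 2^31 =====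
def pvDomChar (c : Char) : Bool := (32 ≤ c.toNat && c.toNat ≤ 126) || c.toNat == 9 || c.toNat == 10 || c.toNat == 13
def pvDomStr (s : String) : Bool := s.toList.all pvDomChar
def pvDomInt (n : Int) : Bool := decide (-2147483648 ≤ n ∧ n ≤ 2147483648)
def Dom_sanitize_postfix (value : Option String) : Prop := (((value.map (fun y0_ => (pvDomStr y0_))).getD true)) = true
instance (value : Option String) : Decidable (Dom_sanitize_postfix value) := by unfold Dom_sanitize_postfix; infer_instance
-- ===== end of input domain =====

-- B is an alternative same-cost implementation: run-grouping instead of A's prev_sep flag machine; return values proved equal.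

-- ===== PORT A =====
-- A: per-character loop with a prev_sep flag; state = (out chars, prev_sep)
def sanitize_postfix (value : Option String) : String :=
  let text := PySem.Str.lower (PySem.Str.strip (value.getD ""))
  if text = "" then ""
  else
    let st := text.toList.foldl
      (fun (st : List Char × Bool) ch =>
        if PySem.Chars.isalnum ch then (st.1 ++ [ch], false)
        else if !st.2 then (st.1 ++ ['-'], true) else st)
      ([], false)
    PySem.Str.stripChars (String.ofList st.1) "-"

-- ===== PORT B =====
-- B: group the text into maximal alnum / non-alnum runs; an alnum run is kept whole, a non-alnum run becomes one '-'
def pvRuns : List Char → List Char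
  | [] => []
  | c :: rest =>
    if PySem.Chars.isalnum c then
      (c :: rest.takeWhile PySem.Chars.isalnum) ++ pvRuns (rest.dropWhile PySem.Chars.isalnum)
    else
      '-' :: pvRuns (rest.dropWhile (fun x => !PySem.Chars.isalnum x))
  termination_by cs => cs.length
  decreasing_by
    · have := List.length_dropWhile_le (p := PySem.Chars.isalnum) (l := rest); simp; omega
    · have := List.length_dropWhile_le (p := fun x => !PySem.Chars.isalnum x) (l := rest); simp; omega

def sanitize_postfix_alt (value : Option String) : String :=
  let text := PySem.Str.lower (PySem.Str.strip (value.getD ""))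
  PySem.Str.stripChars (String.ofList (pvRuns text.toList)) "-"

-- ===== PRECONDITION & SPEC =====
def Spec_sanitize_postfix (value : Option String) (out : String) : Prop := out = sanitize_postfix_alt value
instance (value : Option String) (out : String) : Decidable (Spec_sanitize_postfix value out) := by unfold Spec_sanitize_postfix; infer_instance

-- ===== CLAIM (what is proved, stated in full; the proofs are below) =====
def Claim_equal_sanitize_postfix : Prop := ∀ (value : Option String), Dom_sanitize_postfix value → Spec_sanitize_postfix value (sanitize_postfix value)

-- ===== LEMMAS AND PROOFS =====

-- A's state machine as a plain recursion (prev = the prev_sep flag)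
def pvMach (prev : Bool) : List Char → List Char
  | [] => []
  | c :: cs =>
    if PySem.Chars.isalnum c then c :: pvMach false cs
    else if prev then pvMach true cs else '-' :: pvMach true cs

theorem pvFoldl_eq_mach (cs : List Char) : ∀ (acc : List Char) (prev : Bool),
    (cs.foldl (fun (st : List Char × Bool) ch =>
        if PySem.Chars.isalnum ch then (st.1 ++ [ch], false)
        else if !st.2 then (st.1 ++ ['-'], true) else st) (acc, prev)).1
      = acc ++ pvMach prev cs := by
  induction cs with
  | nil => intro acc prev; simp [pvMach]
  | cons c cs ih =>
    intro acc prev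
    simp only [Bool.not_eq_true'] at ih ⊢
    by_cases h : PySem.Chars.isalnum c = true
    · simp [pvMach, h, ih]
    · cases prev <;> simp [pvMach, h, ih]

theorem pvRuns_take_drop (rest : List Char) :
    rest.takeWhile PySem.Chars.isalnum ++ pvRuns (rest.dropWhile PySem.Chars.isalnum) = pvRuns rest := by
  cases rest with
  | nil => simp [pvRuns]
  | cons c t =>
    by_cases h : PySem.Chars.isalnum c = true
    · conv_rhs => rw [pvRuns.eq_def]
      simp [h]
    · simp [List.takeWhile, List.dropWhile, h]

theorem pvMach_eq_runs (cs : List Char) :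
    pvMach false cs = pvRuns cs ∧
      pvMach true cs = pvRuns (cs.dropWhile (fun x => !PySem.Chars.isalnum x)) := by
  induction cs with
  | nil => simp [pvMach, pvRuns]
  | cons c rest ih =>
    by_cases h : PySem.Chars.isalnum c = true
    · constructor
      · rw [pvRuns.eq_def]
        simp [pvMach, h, ih.1, pvRuns_take_drop]
      · rw [List.dropWhile_cons]
        simp only [h, Bool.not_true]
        rw [pvRuns.eq_def]
        simp [pvMach, h, ih.1, pvRuns_take_drop]
    · constructor
      · rw [pvRuns.eq_def]; simp [pvMach, h, ih.2]
      · rw [List.dropWhile_cons]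
        simp [pvMach, h, ih.2]

-- ===== VERDICT (by name: the statement is the Claim_ definition above) =====
theorem sanitize_postfix_spec : Claim_equal_sanitize_postfix := by
  intro value _
  unfold Spec_sanitize_postfix sanitize_postfix sanitize_postfix_alt
  by_cases h : PySem.Str.lower (PySem.Str.strip (value.getD "")) = ""
  · rw [h]
    have h0 : pvRuns ([] : List Char) = [] := by rw [pvRuns.eq_def]
    simp [h0, PySem.Str.stripChars, PySem.Chars.stripChars]
  · simp only [h, if_false]
    rw [pvFoldl_eq_mach, (pvMach_eq_runs _).1]
    simp
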